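-- pv_equiv track=rewrite | github.com/Ehuntwork/cs-sprint-challenge-hash-tables | hashtables/ex4/ex4.py | has_negatives
-- ===== SOURCE A (Python) =====
-- def has_negatives(a):
--     """
--     YOUR CODE HERE
--     """
--     # Your code here
--     result = []
--     cache = {}
--
--     for x in a:
--         if x < 0:
--             negX = x * -1
--             if negX in cache and cache[negX] == False:
--                 cache[negX] == True
--                 result.append(negX)
--             if negX not in cache:
--                 cache[negX] = True
--
--         if x not in cache and x > 0:
--             cache[x] = False
--
--         if x in cache and cache[x] == True:
--             result.append(x)
--
--     return result
-- ===== SOURCE B (Python) =====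
-- def has_negatives(a):
--     # Pass 1: record the sign of the first occurrence touching each absolute value.
--     first_sign = {}
--     for x in a:
--         if x > 0:
--             first_sign.setdefault(x, 'pos')
--         elif x < 0:
--             first_sign.setdefault(-x, 'neg')
--     # Pass 2: emit |x| for every occurrence whose sign is opposite to the first touch.
--     out = []
--     for x in a:
--         if x < 0:
--             if first_sign.get(-x) == 'pos':
--                 out.append(-x)
--         elif x > 0:
--             if first_sign.get(x) == 'neg':
--                 out.append(x)
--     return out
-- ===== Notes on version B (the rewrite author's own statement) =====
-- stated objective: simpler
-- what changed: Replaces A's single interleaved pass with a mutable boolean cache (including a dead 'cache[negX] == True' statement) by two plain passes: one building a first-touch sign table with setdefault, one emitting |x| whenever an occurrence's sign is opposite to that first touch.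
import Mathlib
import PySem

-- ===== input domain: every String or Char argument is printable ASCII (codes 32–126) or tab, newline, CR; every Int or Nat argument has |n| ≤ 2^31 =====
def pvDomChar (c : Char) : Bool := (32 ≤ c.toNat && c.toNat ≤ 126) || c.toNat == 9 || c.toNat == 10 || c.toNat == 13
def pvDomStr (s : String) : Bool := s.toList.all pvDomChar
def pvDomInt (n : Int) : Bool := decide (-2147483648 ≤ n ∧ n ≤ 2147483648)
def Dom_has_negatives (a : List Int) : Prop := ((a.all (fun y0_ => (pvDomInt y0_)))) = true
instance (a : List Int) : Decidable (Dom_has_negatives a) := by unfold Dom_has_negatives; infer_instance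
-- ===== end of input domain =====

-- B replaces A's single interleaved stateful-cache pass by a first-touch-sign table built in
-- one pass plus a second emitting pass ("simpler" decomposition, same O(n) cost).

-- ===== PORT A =====
-- one iteration of A's loop over state (result, cache); the source's 'cache[negX] == True'
-- is a comparison, not an assignment, hence has no effect and is not modelled
def aStep (st : List Int × PySem.Dict Int Bool) (x : Int) : List Int × PySem.Dict Int Bool :=
  let result := st.1
  let cache := st.2
  -- if x < 0: negX = x * -1; if negX in cache and cache[negX] == False: result.append(negX)
  let result := if x < 0 ∧ cache.contains (x * -1) ∧ cache.getD (x * -1) false = false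
                then result ++ [x * -1] else result
  -- if x < 0: if negX not in cache: cache[negX] = True
  let cache := if x < 0 ∧ ¬ cache.contains (x * -1) then cache.insert (x * -1) true else cache
  -- if x not in cache and x > 0: cache[x] = False
  let cache := if ¬ cache.contains x ∧ 0 < x then cache.insert x false else cache
  -- if x in cache and cache[x] == True: result.append(x)
  let result := if cache.contains x ∧ cache.getD x false = true then result ++ [x] else result
  (result, cache)

def has_negatives (a : List Int) : List Int :=
  (a.foldl aStep ([], PySem.Dict.empty)).1

-- ===== PORT B =====
-- pass 1: first_sign.setdefault on the absolute value
def bTouch (t : PySem.Dict Int String) (x : Int) : PySem.Dict Int String :=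
  if 0 < x then t.setdefault x "pos"
  else if x < 0 then t.setdefault (-x) "neg"
  else t

-- pass 2: emit |x| when the first touch had the opposite sign
def bEmit (t : PySem.Dict Int String) (out : List Int) (x : Int) : List Int :=
  if x < 0 then (if t.get? (-x) = some "pos" then out ++ [-x] else out)
  else if 0 < x then (if t.get? x = some "neg" then out ++ [x] else out)
  else out

def has_negatives_alt (a : List Int) : List Int :=
  let t := a.foldl bTouch PySem.Dict.empty
  a.foldl (bEmit t) []

-- ===== PRECONDITION & SPEC =====
def Spec_has_negatives (a : List Int) (out : List Int) : Prop := out = has_negatives_alt a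
instance (a : List Int) (out : List Int) : Decidable (Spec_has_negatives a out) := by unfold Spec_has_negatives; infer_instance

-- ===== CLAIM (what is proved, stated in full; the proofs are below) =====
def Claim_equal_has_negatives : Prop := ∀ (a : List Int), Dom_has_negatives a → Spec_has_negatives a (has_negatives a)

-- ===== LEMMAS AND PROOFS =====

-- invariant relating A's running cache to B's first-touch table
def CacheInv (c : PySem.Dict Int Bool) (t : PySem.Dict Int String) : Prop :=
  (∀ v, c.get? v = (t.get? v).map (fun s => s == "neg")) ∧
  (∀ v, v ≤ 0 → t.get? v = none) ∧
  (∀ v s, t.get? v = some s → s = "pos" ∨ s = "neg")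

lemma touch_mono (t : PySem.Dict Int String) (x k : Int) (v : String)
    (h : t.get? k = some v) : (bTouch t x).get? k = some v := by
  have hc : t.contains k = true := by
    rw [PySem.Dict.contains_eq_isSome_get?, h]; rfl
  unfold bTouch
  split_ifs with h1 h2
  · by_cases hk : k = x
    · subst hk; rw [PySem.Dict.setdefault_of_contains t _ hc]; exact h
    · by_cases hcx : t.contains x = true
      · rw [PySem.Dict.setdefault_of_contains t _ hcx]; exact h
      · rw [PySem.Dict.setdefault_of_not_contains t _ (by simpa using hcx)]
        rw [PySem.Dict.get?_insert_of_ne _ _ hk]; exact h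
  · by_cases hk : k = -x
    · subst hk; rw [PySem.Dict.setdefault_of_contains t _ hc]; exact h
    · by_cases hcx : t.contains (-x) = true
      · rw [PySem.Dict.setdefault_of_contains t _ hcx]; exact h
      · rw [PySem.Dict.setdefault_of_not_contains t _ (by simpa using hcx)]
        rw [PySem.Dict.get?_insert_of_ne _ _ hk]; exact h
  · exact h

lemma pass1_mono (l : List Int) (t : PySem.Dict Int String) (k : Int) (v : String)
    (h : t.get? k = some v) : (l.foldl bTouch t).get? k = some v := by
  induction l generalizing t with
  | nil => exact h
  | cons x rest ih => exact ih _ (touch_mono t x k v h)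

lemma bEmit_append (t : PySem.Dict Int String) (acc : List Int) (x : Int) :
    bEmit t acc x = acc ++ bEmit t [] x := by
  unfold bEmit; split_ifs <;> simp

lemma emit_acc (t : PySem.Dict Int String) (l : List Int) (acc : List Int) :
    l.foldl (bEmit t) acc = acc ++ l.foldl (bEmit t) [] := by
  induction l generalizing acc with
  | nil => simp
  | cons x rest ih =>
      simp only [List.foldl_cons]
      rw [ih (bEmit t acc x), ih (bEmit t [] x), bEmit_append]
      simp

lemma inv_insert (c : PySem.Dict Int Bool) (t : PySem.Dict Int String) (hI : CacheInv c t)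
    (k : Int) (hk : 0 < k) (b : Bool) (s : String) (hs : s = "pos" ∨ s = "neg")
    (hbs : b = (s == "neg")) : CacheInv (c.insert k b) (t.insert k s) := by
  obtain ⟨hm, hpos, hval⟩ := hI
  refine ⟨?_, ?_, ?_⟩
  · intro v; rw [PySem.Dict.get?_insert, PySem.Dict.get?_insert]
    split_ifs with h
    · simp [hbs]
    · exact hm v
  · intro v hv; rw [PySem.Dict.get?_insert, if_neg (by omega)]; exact hpos v hv
  · intro v s' h'; rw [PySem.Dict.get?_insert] at h'
    split_ifs at h' with h
    · cases h'; exact hs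
    · exact hval v s' h'

-- one step: A's appended element equals B's emission read from the table after touching x,
-- and the invariant is preserved
lemma step_eq (c : PySem.Dict Int Bool) (t : PySem.Dict Int String) (res : List Int) (x : Int)
    (hI : CacheInv c t) :
    (aStep (res, c) x).1 = res ++ bEmit (bTouch t x) [] x ∧ CacheInv (aStep (res, c) x).2 (bTouch t x) := by
  obtain ⟨hm, hpos, hval⟩ := hI
  rcases lt_trichotomy x 0 with hx | hx | hx
  · -- x < 0, the only relevant key is -x
    have hx0 : ¬ 0 < x := by omega
    have hxx : c.get? x = none := by rw [hm, hpos x (by omega)]; rfl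
    have hcx : c.contains x = false := by rw [PySem.Dict.contains_eq_isSome_get?, hxx]; rfl
    cases ht : t.get? (-x) with
    | none =>
      have hcget : c.get? (-x) = none := by rw [hm, ht]; rfl
      have hcont : c.contains (-x) = false := by rw [PySem.Dict.contains_eq_isSome_get?, hcget]; rfl
      have htc : t.contains (-x) = false := by rw [PySem.Dict.contains_eq_isSome_get?, ht]; rfl
      have hbt : bTouch t x = t.insert (-x) "neg" := by
        unfold bTouch
        rw [if_neg hx0, if_pos hx, PySem.Dict.setdefault_of_not_contains t _ htc]
      have hcx' : (c.insert (-x) true).contains x = false := by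
        rw [PySem.Dict.contains_eq_isSome_get?,
            PySem.Dict.get?_insert_of_ne _ _ (by omega : x ≠ -x), hxx]; rfl
      have ha : aStep (res, c) x = (res, c.insert (-x) true) := by
        simp [aStep, hx, hx0, hcont, hcx']
      rw [ha, hbt]
      refine ⟨?_, ?_⟩
      · simp [bEmit, hx, PySem.Dict.get?_insert_self]
      · exact inv_insert c t ⟨hm, hpos, hval⟩ (-x) (by omega) true "neg" (Or.inr rfl) rfl
    | some s =>
      have hcget : c.get? (-x) = some (s == "neg") := by rw [hm, ht]; rfl
      have hcont : c.contains (-x) = true := by rw [PySem.Dict.contains_eq_isSome_get?, hcget]; rfl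
      have htc : t.contains (-x) = true := by rw [PySem.Dict.contains_eq_isSome_get?, ht]; rfl
      have hbt : bTouch t x = t := by
        unfold bTouch
        rw [if_neg hx0, if_pos hx, PySem.Dict.setdefault_of_contains t _ htc]
      have hgd : c.getD (-x) false = (s == "neg") := PySem.Dict.getD_of_get?_eq_some c false hcget
      rcases hval (-x) s ht with hsv | hsv
      · -- first touch positive: A appends -x, B emits -x
        have ha : aStep (res, c) x = (res ++ [-x], c) := by
          simp [aStep, hx, hx0, hcont, hgd, hsv, hcx]
        rw [ha, hbt]
        exact ⟨by simp [bEmit, hx, ht, hsv], hm, hpos, hval⟩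
      · -- first touch negative: nothing happens
        have ha : aStep (res, c) x = (res, c) := by
          simp [aStep, hx, hx0, hcont, hgd, hsv, hcx]
        rw [ha, hbt]
        exact ⟨by simp [bEmit, hx, ht, hsv], hm, hpos, hval⟩
  · -- x = 0: nothing happens on either side
    subst hx
    have hxx : c.get? 0 = none := by rw [hm, hpos 0 le_rfl]; rfl
    have hcx : c.contains (0 : Int) = false := by rw [PySem.Dict.contains_eq_isSome_get?, hxx]; rfl
    have ha : aStep (res, c) 0 = (res, c) := by simp [aStep, hcx]
    have hbt : bTouch t 0 = t := by unfold bTouch; simp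
    rw [ha, hbt]
    exact ⟨by simp [bEmit], hm, hpos, hval⟩
  · -- 0 < x, the only relevant key is x
    have hx0 : ¬ x < 0 := by omega
    cases ht : t.get? x with
    | none =>
      have hcget : c.get? x = none := by rw [hm, ht]; rfl
      have hcont : c.contains x = false := by rw [PySem.Dict.contains_eq_isSome_get?, hcget]; rfl
      have htc : t.contains x = false := by rw [PySem.Dict.contains_eq_isSome_get?, ht]; rfl
      have hbt : bTouch t x = t.insert x "pos" := by
        unfold bTouch
        rw [if_pos hx, PySem.Dict.setdefault_of_not_contains t _ htc]
      have hgd : (c.insert x false).getD x false = false :=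
        PySem.Dict.getD_of_get?_eq_some _ false (PySem.Dict.get?_insert_self c x false)
      have ha : aStep (res, c) x = (res, c.insert x false) := by
        simp [aStep, hx, hx0, hcont, hgd]
      rw [ha, hbt]
      refine ⟨?_, ?_⟩
      · simp [bEmit, hx, hx0, PySem.Dict.get?_insert_self]
      · exact inv_insert c t ⟨hm, hpos, hval⟩ x hx false "pos" (Or.inl rfl) rfl
    | some s =>
      have hcget : c.get? x = some (s == "neg") := by rw [hm, ht]; rfl
      have hcont : c.contains x = true := by rw [PySem.Dict.contains_eq_isSome_get?, hcget]; rfl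
      have htc : t.contains x = true := by rw [PySem.Dict.contains_eq_isSome_get?, ht]; rfl
      have hbt : bTouch t x = t := by
        unfold bTouch
        rw [if_pos hx, PySem.Dict.setdefault_of_contains t _ htc]
      have hgd : c.getD x false = (s == "neg") := PySem.Dict.getD_of_get?_eq_some c false hcget
      rcases hval x s ht with hsv | hsv
      · -- first touch positive: nothing happens
        have ha : aStep (res, c) x = (res, c) := by
          simp [aStep, hx, hx0, hcont, hgd, hsv]
        rw [ha, hbt]
        exact ⟨by simp [bEmit, hx, hx0, ht, hsv], hm, hpos, hval⟩
      · -- first touch negative: A appends x, B emits x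
        have ha : aStep (res, c) x = (res ++ [x], c) := by
          simp [aStep, hx, hx0, hcont, hgd, hsv]
        rw [ha, hbt]
        exact ⟨by simp [bEmit, hx, hx0, ht, hsv], hm, hpos, hval⟩

-- B's emission for x reads the final table, but the key |x| is already fixed after touching x
lemma emit_head (rest : List Int) (t : PySem.Dict Int String) (x : Int) :
    bEmit (rest.foldl bTouch (bTouch t x)) [] x = bEmit (bTouch t x) [] x := by
  rcases lt_trichotomy x 0 with hx | hx | hx
  · obtain ⟨s, hs⟩ : ∃ s, (bTouch t x).get? (-x) = some s := by
      refine ⟨(t.get? (-x)).getD "neg", ?_⟩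
      unfold bTouch
      rw [if_neg (by omega), if_pos hx]
      exact PySem.Dict.get?_setdefault_self t (-x) "neg"
    have hT := pass1_mono rest _ _ _ hs
    simp [bEmit, hx, hs, hT]
  · subst hx; simp [bEmit]
  · obtain ⟨s, hs⟩ : ∃ s, (bTouch t x).get? x = some s := by
      refine ⟨(t.get? x).getD "pos", ?_⟩
      unfold bTouch
      rw [if_pos hx]
      exact PySem.Dict.get?_setdefault_self t x "pos"
    have hT := pass1_mono rest _ _ _ hs
    have hx' : ¬ x < 0 := by omega
    simp [bEmit, hx, hx', hs, hT]

lemma main_loop (l : List Int) (c : PySem.Dict Int Bool) (t : PySem.Dict Int String)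
    (res : List Int) (hI : CacheInv c t) :
    (l.foldl aStep (res, c)).1 = res ++ l.foldl (bEmit (l.foldl bTouch t)) [] := by
  induction l generalizing c t res with
  | nil => simp
  | cons x rest ih =>
      obtain ⟨h1, h2⟩ := step_eq c t res x hI
      simp only [List.foldl_cons]
      have hpair : aStep (res, c) x = ((aStep (res, c) x).1, (aStep (res, c) x).2) := rfl
      rw [hpair, ih _ _ _ h2, h1]
      rw [emit_acc _ rest (bEmit (List.foldl bTouch (bTouch t x) rest) [] x), emit_head]
      simp

-- ===== VERDICT (by name: the statement is the Claim_ definition above) =====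
theorem has_negatives_spec : Claim_equal_has_negatives := by
  intro a _
  unfold Spec_has_negatives has_negatives has_negatives_alt
  have hI : CacheInv PySem.Dict.empty PySem.Dict.empty := by
    refine ⟨?_, ?_, ?_⟩ <;> simp [PySem.Dict.get?_empty]
  simpa using main_loop a PySem.Dict.empty PySem.Dict.empty [] hI
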